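-- pv_equiv track=rewrite | github.com/nclwater/intense-qc | intense/utils.py | get_dry_periods
-- ===== SOURCE A (Python) =====
-- def get_dry_periods(vals):
--     start_index_list = []
--     duration_list = []
--
--     dry_flag = 0
--     hours_ticker = 0
--
--     for i in range(len(vals)):
--         v = vals[i]
--
--         if v == 0:
--             if dry_flag == 0:
--                 start_index_list.append(i)
--
--             hours_ticker += 1
--             dry_flag = 1
--             if i == len(vals) - 1:
--                 duration_list.append(hours_ticker)
--
--         else:
--             if dry_flag == 1:
--                 duration_list.append(hours_ticker)
--
--             hours_ticker = 0
--             dry_flag = 0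
--
--         if i == len(vals):
--             if dry_flag == 1:
--                 duration_list.append(hours_ticker)
--
--     return [start_index_list, duration_list]
-- ===== SOURCE B (Python) =====
-- def get_dry_periods(vals):
--     start_index_list = []
--     duration_list = []
--     i = 0
--     n = len(vals)
--     while i < n:
--         if vals[i] == 0:
--             j = i + 1
--             while j < n and vals[j] == 0:
--                 j += 1
--             start_index_list.append(i)
--             duration_list.append(j - i)
--             i = j
--         else:
--             i += 1
--     return [start_index_list, duration_list]
-- ===== Notes on version B (the rewrite author's own statement) =====
-- stated objective: simpler
-- what changed: Replaced the dry_flag/hours_ticker state machine threaded through a for-loop (with an end-of-list special case) with a run scan: on hitting a zero, an inner loop finds the end of the maximal zero run and emits its start and length at once.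
import Mathlib
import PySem

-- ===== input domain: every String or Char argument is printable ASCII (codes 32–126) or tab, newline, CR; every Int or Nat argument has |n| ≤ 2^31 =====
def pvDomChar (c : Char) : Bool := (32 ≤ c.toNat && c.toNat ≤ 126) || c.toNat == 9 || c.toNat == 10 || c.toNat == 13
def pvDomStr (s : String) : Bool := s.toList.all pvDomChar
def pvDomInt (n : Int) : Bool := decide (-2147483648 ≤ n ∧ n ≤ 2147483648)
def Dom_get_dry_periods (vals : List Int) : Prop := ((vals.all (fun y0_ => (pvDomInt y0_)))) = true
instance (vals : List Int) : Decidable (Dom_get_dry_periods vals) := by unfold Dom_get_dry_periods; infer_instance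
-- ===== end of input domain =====

-- B replaces A's dry_flag/hours_ticker state machine with a run scan (inner loop per zero run); objective: simpler.

-- ===== PORT A =====
-- loop body of A: state (start_index_list, duration_list, dry_flag, hours_ticker), item (i, vals[i])
def aStep (n : Int) (st : List Int × List Int × Int × Int) (p : Int × Int) :
    List Int × List Int × Int × Int :=
  let (start_index_list, duration_list, dry_flag, hours_ticker) := st
  let (i, v) := p
  let (start_index_list, duration_list, dry_flag, hours_ticker) :=
    if v = 0 then
      let start_index_list := if dry_flag = 0 then start_index_list ++ [i] else start_index_list
      let hours_ticker := hours_ticker + 1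
      let duration_list := if i = n - 1 then duration_list ++ [hours_ticker] else duration_list
      (start_index_list, duration_list, 1, hours_ticker)
    else
      let duration_list := if dry_flag = 1 then duration_list ++ [hours_ticker] else duration_list
      (start_index_list, duration_list, 0, 0)
  -- the (unreachable) 'if i == len(vals)' check at the bottom of A's loop body
  let duration_list := if i = n ∧ dry_flag = 1 then duration_list ++ [hours_ticker] else duration_list
  (start_index_list, duration_list, dry_flag, hours_ticker)

def get_dry_periods (vals : List Int) : List (List Int) :=
  let n : Int := vals.length
  let r := (PySem.List.pyRange 0 n 1).foldl
    (fun st i => aStep n st (i, PySem.List.pyGetD vals i 0)) ([], [], 0, 0)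
  [r.1, r.2.1]

-- ===== PORT B =====
-- length of the leading zero run (B's inner 'while j < n and vals[j] == 0' scan)
def zrunN : List Int → Nat
  | [] => 0
  | v :: rest => if v = 0 then zrunN rest + 1 else 0

-- B's outer while loop: scan from position i, emitting (start, length) per zero run
def bGo : List Int → Int → List Int × List Int
  | [], _ => ([], [])
  | v :: rest, i =>
    if v = 0 then
      let k : Nat := zrunN rest + 1
      let (s, d) := bGo (rest.drop (zrunN rest)) (i + (k : Int))
      (i :: s, (k : Int) :: d)
    else
      bGo rest (i + 1)
termination_by l _ => l.length
decreasing_by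
  all_goals simp only [List.length_drop, List.length_cons]
  all_goals omega

def get_dry_periods_alt (vals : List Int) : List (List Int) :=
  [(bGo vals 0).1, (bGo vals 0).2]

-- ===== PRECONDITION & SPEC =====
def Spec_get_dry_periods (vals : List Int) (out : List (List Int)) : Prop := out = get_dry_periods_alt vals
instance (vals : List Int) (out : List (List Int)) : Decidable (Spec_get_dry_periods vals out) := by unfold Spec_get_dry_periods; infer_instance

-- ===== CLAIM (what is proved, stated in full; the proofs are below) =====
def Claim_equal_get_dry_periods : Prop := ∀ (vals : List Int), Dom_get_dry_periods vals → Spec_get_dry_periods vals (get_dry_periods vals)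

-- ===== LEMMAS AND PROOFS =====

-- main invariant: processing a suffix 'rest' starting at index i (with i + |rest| = n),
-- in a clean state (dry_flag 0) or inside a zero run (dry_flag 1, ticker h), matches B.
lemma ab_loop (n : Int) (rest : List Int) :
    (∀ (i : Int) (s d : List Int), i + rest.length = n →
      (((PySem.List.enumerate rest i).foldl (aStep n) (s, d, 0, 0)).1,
       ((PySem.List.enumerate rest i).foldl (aStep n) (s, d, 0, 0)).2.1)
        = (s ++ (bGo rest i).1, d ++ (bGo rest i).2))
    ∧ (∀ (i : Int) (s d : List Int) (h : Int), i + rest.length = n →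
      (((PySem.List.enumerate rest i).foldl (aStep n) (s, d, 1, h)).1,
       ((PySem.List.enumerate rest i).foldl (aStep n) (s, d, 1, h)).2.1)
        = if rest = [] then (s, d)
          else (s ++ (bGo (rest.drop (zrunN rest)) (i + zrunN rest)).1,
                (d ++ [h + zrunN rest]) ++ (bGo (rest.drop (zrunN rest)) (i + zrunN rest)).2)) := by
  induction rest with
  | nil =>
    constructor
    · intro i s d _; simp [PySem.List.enumerate_nil, bGo]
    · intro i s d h _; simp [PySem.List.enumerate_nil]
  | cons v rest ih =>
    obtain ⟨ihc, ihd⟩ := ih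
    constructor
    · intro i s d hi
      have hin : i ≠ n := by simp at hi; omega
      have hi' : (i + 1) + (rest.length : Int) = n := by simp at hi ⊢; omega
      rw [PySem.List.enumerate_cons, List.foldl_cons]
      by_cases hv : v = 0
      · subst hv
        by_cases hr : rest = []
        · subst hr
          have hlast : i = n - 1 := by simp at hi; omega
          simp [aStep, hlast, PySem.List.enumerate_nil, bGo, zrunN]
        · have hne : i ≠ n - 1 := by
            have := List.length_pos_iff.mpr hr; simp at hi; omega
          have hstep : aStep n ((s, d, 0, 0) : List Int × List Int × Int × Int) (i, 0)
              = (s ++ [i], d, 1, 1) := by simp [aStep, hne, hin]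
          rw [hstep]
          have hd := ihd (i + 1) (s ++ [i]) d 1 hi'
          rw [if_neg hr] at hd
          rw [hd]
          simp [bGo]
          refine ⟨?_, ?_, ?_⟩ <;> ring_nf
      · have hstep : aStep n ((s, d, 0, 0) : List Int × List Int × Int × Int) (i, v)
            = (s, d, 0, 0) := by simp [aStep, hv, hin]
        rw [hstep]
        have hc := ihc (i + 1) s d hi'
        rw [hc]
        simp [bGo, hv]
    · intro i s d h hi
      have hin : i ≠ n := by simp at hi; omega
      have hi' : (i + 1) + (rest.length : Int) = n := by simp at hi ⊢; omega
      rw [PySem.List.enumerate_cons, List.foldl_cons]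
      by_cases hv : v = 0
      · subst hv
        rw [if_neg (List.cons_ne_nil _ _)]
        by_cases hr : rest = []
        · subst hr
          have hlast : i = n - 1 := by simp at hi; omega
          simp [aStep, hlast, PySem.List.enumerate_nil, bGo, zrunN]
        · have hne : i ≠ n - 1 := by
            have := List.length_pos_iff.mpr hr; simp at hi; omega
          have hstep : aStep n ((s, d, 1, h) : List Int × List Int × Int × Int) (i, 0)
              = (s, d, 1, h + 1) := by simp [aStep, hne, hin]
          rw [hstep]
          have hd := ihd (i + 1) s d (h + 1) hi'
          rw [if_neg hr] at hd
          rw [hd]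
          simp [zrunN]
          refine ⟨?_, ?_, ?_⟩ <;> ring_nf
      · have hstep : aStep n ((s, d, 1, h) : List Int × List Int × Int × Int) (i, v)
            = (s, d ++ [h], 0, 0) := by simp [aStep, hv, hin]
        rw [hstep, if_neg (List.cons_ne_nil _ _)]
        have hc := ihc (i + 1) s (d ++ [h]) hi'
        rw [hc]
        simp [bGo, hv, zrunN]

-- ===== VERDICT (by name: the statement is the Claim_ definition above) =====
theorem get_dry_periods_spec : Claim_equal_get_dry_periods := by
  intro vals _
  unfold Spec_get_dry_periods get_dry_periods get_dry_periods_alt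
  have he := PySem.List.enumerate_eq_map_pyRange (xs := vals) (d := (0 : Int))
  simp only [PySem.List.len_eq] at he
  have hf : (PySem.List.enumerate vals 0).foldl (aStep (vals.length : Int))
        (([], [], 0, 0) : List Int × List Int × Int × Int)
      = (PySem.List.pyRange 0 (vals.length : Int) 1).foldl
        (fun st i => aStep (vals.length : Int) st (i, PySem.List.pyGetD vals i 0)) ([], [], 0, 0) := by
    rw [he, List.foldl_map]
  have hc := (ab_loop (vals.length : Int) vals).1 0 [] [] (by simp)
  simp only [List.nil_append] at hc
  rw [hf] at hc
  simp only [Prod.mk.injEq] at hc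
  obtain ⟨t1, t2⟩ := hc
  show [_, _] = [_, _]
  rw [t1, t2]
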